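-- pv_equiv track=rewrite | github.com/dynm/pico-flexray | build_replay_payload.py | pack_bits_to_words_msb_first
-- ===== SOURCE A (Python) =====
-- from typing import List, Tuple
--
-- def pack_bits_to_words_msb_first(bits: List[int]) -> List[int]:
--     words: List[int] = []
--     # pad to 32-bit boundary with idle '1's
--     if len(bits) % 32 != 0:
--         pad = 32 - (len(bits) % 32)
--         bits = bits + [1] * pad
--     for i in range(0, len(bits), 32):
--         word = 0
--         for b in bits[i:i+32]:
--             word = ((word << 1) | (b & 1)) & 0xFFFFFFFF
--         words.append(word)
--     return words
-- ===== SOURCE B (Python) =====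
-- from typing import List
--
-- def pack_bits_to_words_msb_first(bits: List[int]) -> List[int]:
--     # Fold all bits into one big integer, then extract 32-bit words by
--     # division/remainder — a two-pass decomposition instead of nested loops.
--     pad = (-len(bits)) % 32
--     big = 0
--     for b in bits:
--         big = big * 2 + (b % 2)
--     big = big * (1 << pad) + ((1 << pad) - 1)  # idle '1' padding
--     n_words = (len(bits) + pad) // 32
--     return [(big >> (32 * (n_words - 1 - k))) % 4294967296 for k in range(n_words)]
-- ===== Notes on version B (the rewrite author's own statement) =====
-- stated objective: alternative
-- what changed: Replaces the nested per-chunk shift-or-mask loop with a single fold of all bits into one big integer (idle padding added arithmetically) followed by extraction of each 32-bit word via shift and remainder.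
import Mathlib
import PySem

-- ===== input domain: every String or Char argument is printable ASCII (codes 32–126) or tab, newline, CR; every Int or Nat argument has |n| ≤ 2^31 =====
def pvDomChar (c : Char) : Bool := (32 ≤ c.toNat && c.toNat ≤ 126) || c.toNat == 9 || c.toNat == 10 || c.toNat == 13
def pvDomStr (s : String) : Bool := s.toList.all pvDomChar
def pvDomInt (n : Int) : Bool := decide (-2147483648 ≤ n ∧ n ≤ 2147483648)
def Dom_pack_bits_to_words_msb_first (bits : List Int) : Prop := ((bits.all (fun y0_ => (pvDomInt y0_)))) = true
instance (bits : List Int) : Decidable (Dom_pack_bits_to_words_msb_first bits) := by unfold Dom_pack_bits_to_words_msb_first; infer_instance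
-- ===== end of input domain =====

-- B replaces A's nested shift-or-mask loop by a single fold of all bits into one big
-- integer (idle padding added arithmetically) plus extraction of each 32-bit word by
-- shift and remainder (objective: alternative).

-- ===== PORT A =====
-- inner loop body of A: word = ((word << 1) | (b & 1)) & 0xFFFFFFFF
def pvStepA (word b : Int) : Int :=
  PySem.Int.band (PySem.Int.bor (word <<< (1 : Nat)) (PySem.Int.band b 1)) 0xFFFFFFFF

def pack_bits_to_words_msb_first (bits : List Int) : List Int :=
  let bits2 : List Int :=
    if PySem.Int.mod (bits.length : Int) 32 ≠ 0 then
      bits ++ List.replicate (32 - PySem.Int.mod (bits.length : Int) 32).toNat 1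
    else bits
  (PySem.List.pyRange 0 (bits2.length : Int) 32).foldl
    (fun words i =>
      words ++ [(PySem.List.slice bits2 (some i) (some (i + 32))).foldl pvStepA 0])
    []

-- ===== PORT B =====
-- loop body of B: big = big * 2 + (b % 2)
def pvStepB (big b : Int) : Int := big * 2 + PySem.Int.mod b 2

def pack_bits_to_words_msb_first_alt (bits : List Int) : List Int :=
  let pad : Int := PySem.Int.mod (-(bits.length : Int)) 32
  let big0 : Int := bits.foldl pvStepB 0
  -- the shift amounts below are provably nonnegative, so .toNat is exact
  let big : Int := big0 * ((1 : Int) <<< pad.toNat) + ((1 : Int) <<< pad.toNat - 1)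
  let nWords : Int := PySem.Int.floordiv ((bits.length : Int) + pad) 32
  (PySem.List.pyRange 0 nWords 1).map
    (fun k => PySem.Int.mod (big >>> (32 * (nWords - 1 - k)).toNat) 4294967296)

-- ===== PRECONDITION & SPEC =====
def Spec_pack_bits_to_words_msb_first (bits : List Int) (out : List Int) : Prop := out = pack_bits_to_words_msb_first_alt bits
instance (bits : List Int) (out : List Int) : Decidable (Spec_pack_bits_to_words_msb_first bits out) := by unfold Spec_pack_bits_to_words_msb_first; infer_instance

-- ===== CLAIM (what is proved, stated in full; the proofs are below) =====
def Claim_equal_pack_bits_to_words_msb_first : Prop := ∀ (bits : List Int), Dom_pack_bits_to_words_msb_first bits → Spec_pack_bits_to_words_msb_first bits (pack_bits_to_words_msb_first bits)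

-- ===== LEMMAS AND PROOFS =====

theorem pv_mod2_cases (b : Int) : PySem.Int.mod b 2 = 0 ∨ PySem.Int.mod b 2 = 1 := by
  rw [PySem.Int.mod_eq_emod_of_pos (by omega)]; omega

theorem pv_lor_two_mul_one (a : Nat) : 2*a ||| 1 = 2*a + 1 := by
  have h : (2*a : Nat) = Nat.bit false a := by simp [Nat.bit]
  have h1 : (1 : Nat) = Nat.bit true 0 := by simp [Nat.bit]
  rw [h, h1, Nat.lor_bit]
  simp [Nat.bit]

-- one step of A's inner loop equals one step of B's fold while no overflow occurs
theorem pv_stepA_eq (w b : Int) (h0 : 0 ≤ w) (h1 : 2*w + 1 < 2^32) :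
    pvStepA w b = pvStepB w b := by
  unfold pvStepA pvStepB
  rw [PySem.Int.band_one, Int.shiftLeft_eq]
  have hsh : w * 2^(1:Nat) = 2 * w := by ring
  rw [hsh]
  have hor : PySem.Int.bor (2*w) (PySem.Int.mod b 2) = 2*w + PySem.Int.mod b 2 := by
    rcases pv_mod2_cases b with h | h <;> rw [h]
    · simp [PySem.Int.bor_zero]
    · rw [PySem.Int.bor_of_nonneg (by omega) (by omega)]
      have : (2*w).toNat = 2 * w.toNat := by omega
      rw [this]
      have h2 : ((1:Int)).toNat = 1 := rfl
      rw [h2, pv_lor_two_mul_one]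
      omega
  rw [hor]
  set x := 2*w + PySem.Int.mod b 2 with hx
  have hx0 : 0 ≤ x := by rcases pv_mod2_cases b with h | h <;> omega
  have hx1 : x < 2^32 := by rcases pv_mod2_cases b with h | h <;> omega
  rw [PySem.Int.band_of_nonneg hx0 (by norm_num)]
  have hm : (0xFFFFFFFF : Int).toNat = 2^32 - 1 := rfl
  rw [hm, Nat.and_two_pow_sub_one_eq_mod, Nat.mod_eq_of_lt (by omega)]
  ring_nf
  omega

-- B's fold is positional binary accumulation: the seed shifts past the list
theorem pv_foldB_shift (l : List Int) (w : Int) :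
    l.foldl pvStepB w = w * 2^l.length + l.foldl pvStepB 0 := by
  induction l generalizing w with
  | nil => simp
  | cons b xs ih =>
    simp only [List.foldl_cons, List.length_cons]
    rw [ih (pvStepB w b), ih (pvStepB 0 b)]
    simp only [pvStepB]
    ring

theorem pv_foldB_bounds (l : List Int) :
    0 ≤ l.foldl pvStepB 0 ∧ l.foldl pvStepB 0 < 2^l.length := by
  induction l with
  | nil => simp
  | cons b xs ih =>
    simp only [List.foldl_cons, List.length_cons]
    rw [pv_foldB_shift xs (pvStepB 0 b)]
    have h2 : (2:Int)^(xs.length+1) = 2 * 2^xs.length := by ring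
    have hp : (0:Int) < 2^xs.length := by positivity
    have hb : pvStepB 0 b = 0 ∨ pvStepB 0 b = 1 := by
      simp only [pvStepB]; rcases pv_mod2_cases b with h | h <;> omega
    rcases hb with h | h <;> rw [h] <;> constructor <;> nlinarith [ih.1, ih.2]

-- on a chunk short enough not to overflow 32 bits, A's inner loop = B's fold
theorem pv_foldA_eq_foldB (l : List Int) (w : Int) (h0 : 0 ≤ w)
    (h1 : (w+1) * 2^l.length ≤ 2^32) :
    l.foldl pvStepA w = l.foldl pvStepB w := by
  induction l generalizing w with
  | nil => rfl
  | cons b xs ih =>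
    simp only [List.foldl_cons]
    have hp : (0:Int) < 2^xs.length := by positivity
    have h2 : (2:Int)^(xs.length+1) = 2 * 2^xs.length := by ring
    have hlen : (w+1) * 2^(b::xs).length = 2*(w+1) * 2^xs.length := by
      simp only [List.length_cons]; ring
    have hw1 : 2*w + 1 < 2^32 := by
      have : 2*(w+1) * 2^xs.length ≤ 2^32 := by rw [← hlen]; exact h1
      nlinarith
    rw [pv_stepA_eq w b h0 hw1]
    apply ih
    · simp only [pvStepB]; rcases pv_mod2_cases b with h | h <;> omega
    · have : (pvStepB w b + 1) ≤ 2*(w+1) := by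
        simp only [pvStepB]; rcases pv_mod2_cases b with h | h <;> omega
      calc (pvStepB w b + 1) * 2^xs.length ≤ 2*(w+1) * 2^xs.length := by nlinarith
        _ ≤ 2^32 := by rw [← hlen]; exact h1

theorem pv_foldB_replicate_one (p : Nat) :
    (List.replicate p (1 : Int)).foldl pvStepB 0 = 2^p - 1 := by
  induction p with
  | zero => simp
  | succ q ih =>
    rw [List.replicate_succ]
    simp only [List.foldl_cons]
    rw [pv_foldB_shift]
    have h1 : pvStepB 0 1 = 1 := by simp [pvStepB, PySem.Int.mod_eq_emod_of_pos]
    rw [h1, ih]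
    simp only [List.length_replicate]
    ring

-- extracting word k of the big integer of a 32m-bit list yields chunk k's word
theorem pv_chunk_extract (L : List Int) (m k : Nat) (hL : L.length = 32*m) (hk : k < m) :
    (L.foldl pvStepB 0) / (2:Int)^(32*(m-1-k)) % 2^32 = ((L.drop (32*k)).take 32).foldl pvStepB 0 := by
  have hsplit : L = L.take (32*k+32) ++ L.drop (32*k+32) := (List.take_append_drop _ _).symm
  have hlsuf : (L.drop (32*k+32)).length = 32*(m-1-k) := by
    rw [List.length_drop, hL]; omega
  have hchunk : L.take (32*k+32) = L.take (32*k) ++ (L.drop (32*k)).take 32 := List.take_add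
  have hlchunk : ((L.drop (32*k)).take 32).length = 32 := by
    rw [List.length_take, List.length_drop, hL]; omega
  have hval : L.foldl pvStepB 0
      = ((L.take (32*k)).foldl pvStepB 0 * 2^32 + ((L.drop (32*k)).take 32).foldl pvStepB 0) * 2^(32*(m-1-k))
        + (L.drop (32*k+32)).foldl pvStepB 0 := by
    conv_lhs => rw [hsplit]
    rw [List.foldl_append, pv_foldB_shift (L.drop (32*k+32)), hlsuf]
    congr 1
    conv_lhs => rw [hchunk]
    rw [List.foldl_append, pv_foldB_shift ((L.drop (32*k)).take 32), hlchunk]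
  set pre := (L.take (32*k)).foldl pvStepB 0 * 2^32 + ((L.drop (32*k)).take 32).foldl pvStepB 0 with hpre
  set r := (L.drop (32*k+32)).foldl pvStepB 0 with hr
  have hrb := pv_foldB_bounds (L.drop (32*k+32))
  rw [hlsuf] at hrb
  have hdiv : L.foldl pvStepB 0 / (2:Int)^(32*(m-1-k)) = pre := by
    rw [hval]
    rw [add_comm, Int.add_mul_ediv_right _ _ (by positivity)]
    rw [Int.ediv_eq_zero_of_lt hrb.1 hrb.2]
    ring
  rw [hdiv, hpre]
  have hwb := pv_foldB_bounds ((L.drop (32*k)).take 32)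
  rw [hlchunk] at hwb
  have : (L.take (32*k)).foldl pvStepB 0 * 2^32 + ((L.drop (32*k)).take 32).foldl pvStepB 0
       = ((L.drop (32*k)).take 32).foldl pvStepB 0 + (2:Int)^32 * (L.take (32*k)).foldl pvStepB 0 := by ring
  rw [this, Int.add_mul_emod_self_left]
  exact Int.emod_eq_of_lt hwb.1 hwb.2

theorem pv_foldl_append_map {α β : Type} (l : List α) (f : α → β) (acc : List β) :
    l.foldl (fun a x => a ++ [f x]) acc = acc ++ l.map f := by
  induction l generalizing acc with
  | nil => simp
  | cons x xs ih => simp [List.foldl_cons, ih]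

-- A's outer loop over a 32m-bit list produces the chunk words in order
theorem pv_A_loop (L : List Int) (m : Nat) (hL : L.length = 32*m) :
    (PySem.List.pyRange 0 (L.length : Int) 32).foldl
      (fun words i => words ++ [(PySem.List.slice L (some i) (some (i + 32))).foldl pvStepA 0]) []
    = (List.range m).map (fun j => ((L.drop (32*j)).take 32).foldl pvStepB 0) := by
  rw [PySem.List.pyRange_of_pos 0 (L.length : Int) (by omega)]
  have hcount : (if (0:Int) < (L.length : Int) then (((L.length:Int) - 0 + 32 - 1)/32).toNat else 0) = m := by
    have : (L.length : Int) = 32*(m:Int) := by rw [hL]; push_cast; ring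
    rw [this]
    split <;> omega
  rw [hcount, pv_foldl_append_map, List.nil_append, List.map_map]
  apply List.map_congr_left
  intro j hj
  rw [List.mem_range] at hj
  simp only [Function.comp]
  have h1 : (0 : Int) + 32 * (j:Int) = ((32*j : Nat) : Int) := by push_cast; ring
  rw [h1]
  have h2 : ((32*j : Nat) : Int) + (32:Int) = ((32*j : Nat) : Int) + ((32:Nat) : Int) := by norm_num
  rw [h2, PySem.List.slice_natCast_add]
  apply pv_foldA_eq_foldB _ _ (by omega)
  have hlen : ((L.drop (32*j)).take 32).length ≤ 32 := by
    simp [List.length_take]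
  calc ((0:Int)+1) * 2^((L.drop (32*j)).take 32).length ≤ 1 * 2^32 := by
        have := pow_le_pow_right₀ (by norm_num : (1:Int) ≤ 2) hlen
        nlinarith
    _ = 2^32 := by ring

theorem pv_main (bits : List Int) :
    pack_bits_to_words_msb_first bits = pack_bits_to_words_msb_first_alt bits := by
  set n := bits.length with hn
  set padN : Nat := (32 - n % 32) % 32 with hpadN
  set m : Nat := (n + padN) / 32 with hm
  have hnm : n + padN = 32 * m := by omega
  set L : List Int := bits ++ List.replicate padN 1 with hLdef
  have hL : L.length = 32 * m := by
    simp [hLdef, List.length_append, List.length_replicate, ← hn, hnm]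
  have hA : pack_bits_to_words_msb_first bits
      = (List.range m).map (fun j => ((L.drop (32*j)).take 32).foldl pvStepB 0) := by
    unfold pack_bits_to_words_msb_first
    have hmod : PySem.Int.mod (n : Int) 32 = ((n % 32 : Nat) : Int) := by
      rw [PySem.Int.mod_eq_emod_of_pos (by omega)]; omega
    have hbits2 : (if PySem.Int.mod ((bits.length : Int)) 32 ≠ 0 then
        bits ++ List.replicate (32 - PySem.Int.mod ((bits.length : Int)) 32).toNat 1
      else bits) = L := by
      rw [← hn, hmod]
      by_cases h : n % 32 = 0
      · simp [h, hLdef]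
        have : padN = 0 := by omega
        simp [this]
      · have hne : ((n % 32 : Nat) : Int) ≠ 0 := by
          omega
        rw [if_pos hne]
        have : (32 - ((n % 32 : Nat) : Int)).toNat = padN := by omega
        rw [this, hLdef]
    simp only [hbits2]
    exact pv_A_loop L m hL
  have hpad : PySem.Int.mod (-(n : Int)) 32 = (padN : Int) := by
    rw [PySem.Int.mod_eq_emod_of_pos (by omega)]; omega
  have hbig : bits.foldl pvStepB 0 * ((1 : Int) <<< (padN:Int).toNat)
        + ((1 : Int) <<< (padN:Int).toNat - 1) = L.foldl pvStepB 0 := by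
    rw [hLdef, List.foldl_append, pv_foldB_shift (List.replicate padN 1),
        pv_foldB_replicate_one, List.length_replicate, Int.shiftLeft_eq]
    have : ((padN:Int)).toNat = padN := by omega
    rw [this]; ring
  have hnw : PySem.Int.floordiv ((n : Int) + (padN : Int)) 32 = (m : Int) := by
    rw [PySem.Int.floordiv_eq_ediv_of_pos (by omega)]; omega
  have hB : pack_bits_to_words_msb_first_alt bits
      = (List.range m).map (fun j => ((L.drop (32*j)).take 32).foldl pvStepB 0) := by
    unfold pack_bits_to_words_msb_first_alt
    simp only [← hn, hpad, hnw, hbig]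
    rw [PySem.List.pyRange_zero_nat m, List.map_map]
    apply List.map_congr_left
    intro k hk
    rw [List.mem_range] at hk
    simp only [Function.comp]
    have hs : (32 * ((m:Int) - 1 - (k:Int))).toNat = 32 * (m - 1 - k) := by omega
    rw [hs, Int.shiftRight_eq_div_pow]
    rw [PySem.Int.mod_eq_emod_of_pos (by omega)]
    have h32 : ((2^(32*(m-1-k)) : Nat) : Int) = (2:Int)^(32*(m-1-k)) := by push_cast; ring
    rw [h32]
    have h4 : (4294967296 : Int) = 2^32 := by norm_num
    rw [h4]
    exact pv_chunk_extract L m k hL hk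
  rw [hA, hB]

-- ===== VERDICT (by name: the statement is the Claim_ definition above) =====
theorem pack_bits_to_words_msb_first_spec : Claim_equal_pack_bits_to_words_msb_first := by
  intro bits _
  exact pv_main bits
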